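-- pv_equiv track=rewrite | github.com/solpbc/solstone | think/importers/journal_archive.py | _resolve_root_prefix
-- ===== SOURCE A (Python) =====
-- JOURNAL_ROOT_ENTRIES = {"chronicle", "entities", "facets", "imports", "_export.json"}
--
-- def _top_level_names(names: list[str]) -> set[str]:
--     return {name.split("/", 1)[0] for name in names if name}
--
-- def _resolve_root_prefix(names: list[str]) -> str | None:
--     top_level = _top_level_names(names)
--     if top_level & JOURNAL_ROOT_ENTRIES:
--         return ""
--
--     top_level_dirs = {
--         name for name in top_level if any(item.startswith(f"{name}/") for item in names)
--     }
--     if len(top_level_dirs) != 1: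
--         return None
--
--     wrapper = next(iter(top_level_dirs))
--     nested = []
--     prefix = f"{wrapper}/"
--     for name in names:
--         if name.startswith(prefix):
--             stripped = name[len(prefix) :]
--             if stripped:
--                 nested.append(stripped)
--     if _top_level_names(nested) & JOURNAL_ROOT_ENTRIES:
--         return prefix
--     return None
-- ===== SOURCE B (Python) =====
-- JOURNAL_ROOT_ENTRIES = {"chronicle", "entities", "facets", "imports", "_export.json"}
--
--
-- def _resolve_root_prefix(names):
--     # One pass: group every non-empty name by its first segment; each group keeps
--     # the remainders after the first '/' (only for names that contain a '/').
--     groups = {}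
--     for name in names:
--         if not name:
--             continue
--         head, sep, rest = name.partition("/")
--         bucket = groups.setdefault(head, [])
--         if sep:
--             bucket.append(rest)
--     if any(key in JOURNAL_ROOT_ENTRIES for key in groups):
--         return ""
--     dirs = [key for key, rems in groups.items() if rems]
--     if len(dirs) != 1:
--         return None
--     wrapper = dirs[0]
--     if any(rem.partition("/")[0] in JOURNAL_ROOT_ENTRIES for rem in groups[wrapper] if rem):
--         return f"{wrapper}/"
--     return None
-- ===== Notes on version B (the rewrite author's own statement) =====
-- stated objective: faster
-- what changed: Replaces A's repeated full scans (a set comprehension testing every top-level name against every item, plus a second pass for nested names) by one pass that groups names in a dict from first segment to list of remainders, from which the root check, the unique directory and its nested names are read off directly.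
import Mathlib
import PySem

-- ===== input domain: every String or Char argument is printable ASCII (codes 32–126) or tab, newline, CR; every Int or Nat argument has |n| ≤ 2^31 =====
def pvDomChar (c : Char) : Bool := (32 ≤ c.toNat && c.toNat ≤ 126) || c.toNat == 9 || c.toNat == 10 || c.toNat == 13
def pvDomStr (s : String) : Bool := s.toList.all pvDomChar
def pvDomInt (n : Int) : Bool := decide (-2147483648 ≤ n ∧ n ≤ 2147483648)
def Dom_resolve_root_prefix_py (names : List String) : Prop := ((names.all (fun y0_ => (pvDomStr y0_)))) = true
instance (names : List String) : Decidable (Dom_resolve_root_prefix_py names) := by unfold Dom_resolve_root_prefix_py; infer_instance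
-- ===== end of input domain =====

-- B replaces A's repeated scans over `names` by one dict-grouping pass (first segment -> remainders); objective: faster.


-- ===== PORT A =====

-- JOURNAL_ROOT_ENTRIES = {...}
def pvRootEntries : PySem.Set String :=
  PySem.Set.ofList ["chronicle", "entities", "facets", "imports", "_export.json"]

-- name.split("/", 1)[0]  (sep "/" is non-empty, so splitMax? is `some`, and split never returns []: [0] is safe)
def pvFirstSeg (name : String) : String :=
  ((PySem.Str.splitMax? name "/" 1).getD []).headD ""

-- _top_level_names: {name.split("/", 1)[0] for name in names if name}
def top_level_names_py (names : List String) : PySem.Set String :=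
  PySem.Set.ofList ((names.filter (fun name => name ≠ "")).map pvFirstSeg)

-- _resolve_root_prefix (A).  f"{name}/" is ported as String.ofList (name.toList ++ ['/']) (exact);
-- name[len(prefix):] is PySem.Str.slice with the non-negative start len(prefix).
def resolve_root_prefix_py (names : List String) : Option String :=
  let top_level := top_level_names_py names
  if PySem.Set.inter top_level pvRootEntries ≠ [] then some "" else
  let top_level_dirs : PySem.Set String := PySem.Set.ofList (top_level.filter
      (fun name => names.any (fun item => PySem.Str.startswith item (String.ofList (name.toList ++ ['/'])))))
  if PySem.Set.len top_level_dirs ≠ 1 then none else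
  let wrapper := top_level_dirs.headD ""      -- next(iter(…)) of a one-element set
  let pfx := String.ofList (wrapper.toList ++ ['/'])
  let nested := names.foldl (fun acc name =>
      if PySem.Str.startswith name pfx then
        let stripped := PySem.Str.slice name (some (PySem.Str.len pfx)) none
        if stripped ≠ "" then acc ++ [stripped] else acc
      else acc) []
  if PySem.Set.inter (top_level_names_py nested) pvRootEntries ≠ [] then some pfx else none

-- ===== PORT B =====

-- loop body of B's single grouping pass.  head, sep, rest = name.partition("/") is ported exactly
-- (PySem has no partition): head = chars before the first '/', `sep` is truthy iff '/' occurs in name,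
-- rest = chars after the first '/'.  groups.setdefault(head, []) followed by a conditional in-place
-- append is Dict.modify (append case) / Dict.setdefault (no-slash case).
def pvGroupStep (g : PySem.Dict String (List String)) (name : String) : PySem.Dict String (List String) :=
  if name = "" then g else
  let cs := name.toList
  let head := String.ofList (cs.takeWhile (· ≠ '/'))
  if cs.contains '/' then
    PySem.Dict.modify g head [] (fun b => b ++ [String.ofList ((cs.dropWhile (· ≠ '/')).tail)])
  else PySem.Dict.setdefault g head []

def resolve_root_prefix_py_alt (names : List String) : Option String :=
  let groups : PySem.Dict String (List String) := names.foldl pvGroupStep PySem.Dict.empty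
  if groups.keys.any (fun k => PySem.Set.contains pvRootEntries k) then some "" else
  let dirs := (groups.items.filter (fun p => p.2 ≠ [])).map Prod.fst
  if dirs.length ≠ 1 then none else
  let wrapper := dirs.headD ""
  if ((PySem.Dict.getD groups wrapper []).filter (fun rem => rem ≠ "")).any
       (fun rem => PySem.Set.contains pvRootEntries (String.ofList (rem.toList.takeWhile (· ≠ '/')))) then
    some (String.ofList (wrapper.toList ++ ['/']))
  else none

-- ===== PRECONDITION & SPEC =====
def Spec_resolve_root_prefix_py (names : List String) (out : Option String) : Prop := out = resolve_root_prefix_py_alt names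
instance (names : List String) (out : Option String) : Decidable (Spec_resolve_root_prefix_py names out) := by unfold Spec_resolve_root_prefix_py; infer_instance

-- ===== CLAIM (what is proved, stated in full; the proofs are below) =====
def Claim_equal_resolve_root_prefix_py : Prop := ∀ (names : List String), Dom_resolve_root_prefix_py names → Spec_resolve_root_prefix_py names (resolve_root_prefix_py names)

-- ===== LEMMAS AND PROOFS =====

-- the part of a char list before / after its first '/'
def pvSeg (cs : List Char) : List Char := cs.takeWhile (· ≠ '/')
def pvRest (cs : List Char) : List Char := (cs.dropWhile (· ≠ '/')).tail
def pvSegS (s : String) : String := String.ofList (pvSeg s.toList)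
def pvRestS (s : String) : String := String.ofList (pvRest s.toList)
-- "name contributes remainder pvRestS name to group k"
def pvQ (k n : String) : Bool := !(n == "") && n.toList.contains '/' && (pvSegS n == k)

theorem pv_seg_no_slash (cs : List Char) : '/' ∉ pvSeg cs := by
  intro h
  have := List.mem_takeWhile_imp h
  simp at this

theorem pv_decomp {cs : List Char} (h : '/' ∈ cs) : cs = pvSeg cs ++ '/' :: pvRest cs := by
  induction cs with
  | nil => simp at h
  | cons c r ih =>
    by_cases hc : c = '/'
    · subst hc; simp [pvSeg, pvRest]
    · have hr : '/' ∈ r := by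
        rcases List.mem_cons.mp h with h1 | h1
        · exact absurd h1.symm hc
        · exact h1
      have h1 : pvSeg (c :: r) = c :: pvSeg r := by simp [pvSeg, hc]
      have h2 : pvRest (c :: r) = pvRest r := by simp [pvRest, hc]
      rw [h1, h2, List.cons_append, ← ih hr]

theorem pv_seg_concat {k t : List Char} (hk : '/' ∉ k) : pvSeg (k ++ '/' :: t) = k := by
  induction k with
  | nil => simp [pvSeg]
  | cons a k ih =>
    have ha : a ≠ '/' := fun h => hk (by simp [h])
    have hk' : '/' ∉ k := fun h => hk (by simp [h])
    have hstep : pvSeg ((a :: k) ++ '/' :: t) = a :: pvSeg (k ++ '/' :: t) := by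
      simp [pvSeg, ha]
    rw [hstep, ih hk']

theorem pv_startswith {k : List Char} (cs : List Char) (hk : '/' ∉ k) :
    ((k ++ ['/']).isPrefixOf cs = true ↔ ('/' ∈ cs ∧ pvSeg cs = k)) := by
  rw [List.isPrefixOf_iff_prefix]
  constructor
  · rintro ⟨t, rfl⟩
    rw [List.append_assoc, List.singleton_append]
    exact ⟨by simp, pv_seg_concat hk⟩
  · rintro ⟨h1, h2⟩
    refine ⟨pvRest cs, ?_⟩
    rw [List.append_assoc, List.singleton_append, ← h2]
    exact (pv_decomp h1).symm

theorem pv_strip {k cs : List Char} (hk : '/' ∉ k) (h : (k ++ ['/']).isPrefixOf cs = true) :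
    cs.drop (k.length + 1) = pvRest cs := by
  obtain ⟨h1, h2⟩ := (pv_startswith cs hk).mp h
  conv_lhs => rw [pv_decomp h1, h2]
  have hlen : k.length + 1 = (k ++ ['/']).length := by simp
  have hsplit : k ++ '/' :: pvRest cs = (k ++ ['/']) ++ pvRest cs := by simp
  rw [hlen, hsplit, List.drop_left]

-- String-level startswith characterisation
theorem pv_startswithS (k n : String) (hk : '/' ∉ k.toList) :
    (PySem.Str.startswith n (String.ofList (k.toList ++ ['/'])) = true)
      ↔ (n ≠ "" ∧ n.toList.contains '/' = true ∧ pvSegS n = k) := by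
  rw [PySem.Str.startswith_eq]
  simp only [PySem.Chars.startswith, String.toList_ofList]
  rw [pv_startswith n.toList hk]
  constructor
  · rintro ⟨h1, h2⟩
    refine ⟨?_, by simpa using h1, ?_⟩
    · intro he; subst he; simp at h1
    · simp [pvSegS, h2, String.ofList_toList]
  · rintro ⟨h1, h2, h3⟩
    have h2' : '/' ∈ n.toList := by simpa using h2
    refine ⟨h2', ?_⟩
    have := congrArg String.toList h3
    simpa [pvSegS, String.toList_ofList] using this

-- splitOnMax.go with maxsplit exhausted
theorem pv_go0 (fuel : Nat) (l cur : List Char) (acc : List (List Char)) :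
    PySem.Chars.splitOnMax.go ['/'] fuel 0 l cur acc = ((cur.reverse ++ l) :: acc).reverse := by
  cases fuel <;> cases l <;> simp [PySem.Chars.splitOnMax.go]

-- splitOnMax.go with maxsplit 1
theorem pv_go1 : ∀ (l cur : List Char) (acc : List (List Char)) (fuel : Nat), l.length < fuel →
    PySem.Chars.splitOnMax.go ['/'] fuel 1 l cur acc =
      (if '/' ∈ l then pvRest l :: (cur.reverse ++ pvSeg l) :: acc
       else (cur.reverse ++ l) :: acc).reverse := by
  intro l
  induction l with
  | nil =>
    intro cur acc fuel h
    cases fuel with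
    | zero => omega
    | succ f => simp [PySem.Chars.splitOnMax.go]
  | cons c rest ih =>
    intro cur acc fuel h
    cases fuel with
    | zero => omega
    | succ f =>
      by_cases hc : c = '/'
      · subst hc
        have hstep : PySem.Chars.splitOnMax.go ['/'] (f+1) 1 ('/'::rest) cur acc
            = PySem.Chars.splitOnMax.go ['/'] f 0 rest [] (cur.reverse :: acc) := by
          simp [PySem.Chars.splitOnMax.go, List.isPrefixOf]
        rw [hstep, pv_go0]
        simp [pvRest, pvSeg]
      · have hstep : PySem.Chars.splitOnMax.go ['/'] (f+1) 1 (c::rest) cur acc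
            = PySem.Chars.splitOnMax.go ['/'] f 1 rest (c :: cur) acc := by
          simp [PySem.Chars.splitOnMax.go, List.isPrefixOf]
          intro h'; exact absurd h'.symm hc
        rw [hstep, ih (c :: cur) acc f (by simp at h; omega)]
        by_cases hm : '/' ∈ rest <;>
          simp [hm, hc, pvSeg, pvRest, Ne.symm hc]

theorem pv_firstSeg (s : String) : pvFirstSeg s = pvSegS s := by
  unfold pvFirstSeg pvSegS
  have hsep : ("/" : String).toList = ['/'] := rfl
  simp only [PySem.Str.splitMax?, PySem.Chars.splitMax?, PySem.Chars.splitOnMax, hsep]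
  norm_num
  rw [pv_go1 s.toList [] [] (s.length + 1) (by simp)]
  by_cases h : '/' ∈ s.toList
  · simp [h]
  · rw [if_neg h]
    have hself : pvSeg s.toList = s.toList := by
      apply List.takeWhile_eq_self_iff.mpr
      intro x hx
      simp
      rintro rfl
      exact h hx
    simp [hself]

theorem pv_firstSeg_fun : pvFirstSeg = pvSegS := funext pv_firstSeg

-- one grouping step: effect on keys
theorem pv_stepKeys (g : PySem.Dict String (List String)) (n : String) :
    (pvGroupStep g n).keys = if n = "" then g.keys else PySem.Set.add g.keys (pvSegS n) := by
  by_cases hn : n = ""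
  · simp [pvGroupStep, hn]
  · simp only [pvGroupStep, hn, if_false]
    have hkey : String.ofList (n.toList.takeWhile (· ≠ '/')) = pvSegS n := rfl
    by_cases hs : n.toList.contains '/'
    · rw [if_pos hs, PySem.Dict.keys_modify]
      by_cases hc : PySem.Dict.contains g (pvSegS n)
      · rw [hkey, PySem.Dict.keys_insert_of_contains _ _ hc, PySem.Set.add_eq_ite,
            if_pos (by rwa [PySem.Dict.contains_eq_decide_mem_keys, decide_eq_true_iff] at hc)]
      · rw [hkey, PySem.Dict.keys_insert_of_not_contains _ _ (by simpa using hc), PySem.Set.add_eq_ite,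
            if_neg (by rw [PySem.Dict.contains_eq_decide_mem_keys] at hc; simpa using hc)]
    · rw [if_neg hs, hkey, PySem.Dict.keys_setdefault, PySem.Set.add_eq_ite,
          PySem.Dict.contains_eq_decide_mem_keys]
      by_cases hm : pvSegS n ∈ g.keys <;> simp [hm]

theorem pv_keys : ∀ (names : List String) (g : PySem.Dict String (List String)),
    (names.foldl pvGroupStep g).keys
      = PySem.Set.update g.keys ((names.filter (fun n => n ≠ "")).map pvSegS) := by
  intro names
  induction names with
  | nil => intro g; simp [PySem.Set.update_nil]
  | cons n ns ih =>
    intro g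
    rw [List.foldl_cons, ih, pv_stepKeys]
    by_cases hn : n = ""
    · simp [hn]
    · rw [if_neg hn, List.filter_cons, if_pos (by simpa using hn), List.map_cons,
          PySem.Set.update_cons]

theorem pv_keys_empty (names : List String) :
    (names.foldl pvGroupStep PySem.Dict.empty).keys
      = PySem.Set.ofList ((names.filter (fun n => n ≠ "")).map pvSegS) := by
  rw [pv_keys, PySem.Dict.keys_empty, PySem.Set.update_nil_left]

-- one grouping step: effect on a group's remainder list
theorem pv_stepGetD (g : PySem.Dict String (List String)) (n k : String) :
    (pvGroupStep g n).getD k [] = if pvQ k n then g.getD k [] ++ [pvRestS n] else g.getD k [] := by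
  by_cases hn : n = ""
  · simp [pvGroupStep, pvQ, hn]
  · simp only [pvGroupStep, if_neg hn]
    have hkey : String.ofList (n.toList.takeWhile (· ≠ '/')) = pvSegS n := rfl
    have hrest : String.ofList ((n.toList.dropWhile (· ≠ '/')).tail) = pvRestS n := rfl
    by_cases hs : n.toList.contains '/'
    · have hs' : '/' ∈ n.toList := by simpa using hs
      rw [if_pos hs, hkey, PySem.Dict.getD_modify]
      by_cases hkk : k = pvSegS n
      · rw [if_pos hkk, hrest, hkk]
        simp [pvQ, hn, hs']
      · rw [if_neg hkk,
            if_neg (by simp [pvQ]; intro _ _ he; exact hkk he.symm)]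
    · have hs' : '/' ∉ n.toList := by simpa using hs
      rw [if_neg hs, if_neg (by simp [pvQ, hs'])]
      by_cases hkk : k = pvSegS n
      · rw [hkk, hkey, PySem.Dict.getD_setdefault_self]
      · rw [PySem.Dict.getD, PySem.Dict.get?_setdefault_of_ne _ _ (by rw [hkey]; exact hkk),
            ← PySem.Dict.getD]

theorem pv_getD : ∀ (names : List String) (g : PySem.Dict String (List String)) (k : String),
    (names.foldl pvGroupStep g).getD k []
      = g.getD k [] ++ (names.filter (pvQ k)).map pvRestS := by
  intro names
  induction names with
  | nil => intro g k; simp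
  | cons n ns ih =>
    intro g k
    simp only [List.foldl_cons, List.filter_cons]
    rw [ih, pv_stepGetD]
    by_cases hq : pvQ k n <;> simp [hq]

theorem pv_filter_ne_nil {α : Type} (p : α → Bool) (l : List α) :
    (l.filter p ≠ []) ↔ l.any p = true := by
  rw [Ne, List.filter_eq_nil_iff, List.any_eq_true]
  simp

theorem pv_inter_ne_nil (l : List String) (t : PySem.Set String) :
    (PySem.Set.inter (PySem.Set.ofList l) t ≠ []) ↔ l.any (fun x => PySem.Set.contains t x) = true := by
  show (List.filter (fun x => PySem.Set.contains t x) (PySem.Set.ofList l) ≠ []) ↔ _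
  rw [pv_filter_ne_nil, List.any_eq_true, List.any_eq_true]
  constructor
  · rintro ⟨x, hx, hp⟩; exact ⟨x, (PySem.Set.mem_ofList l x).mp hx, hp⟩
  · rintro ⟨x, hx, hp⟩; exact ⟨x, (PySem.Set.mem_ofList l x).mpr hx, hp⟩

theorem pv_bool_ext {a b : Bool} (h : a = true ↔ b = true) : a = b := by
  cases a <;> cases b <;> simp_all

theorem pv_sw (k n : String) (hk : '/' ∉ k.toList) :
    PySem.Str.startswith n (String.ofList (k.toList ++ ['/'])) = pvQ k n := by
  apply pv_bool_ext
  rw [pv_startswithS k n hk]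
  simp [pvQ]
  tauto

theorem pv_main (names : List String) :
    resolve_root_prefix_py names = resolve_root_prefix_py_alt names := by
  unfold resolve_root_prefix_py resolve_root_prefix_py_alt
  dsimp only
  set G := names.foldl pvGroupStep PySem.Dict.empty with hG
  have hkeys : G.keys = PySem.Set.ofList ((names.filter (fun n => n ≠ "")).map pvSegS) :=
    pv_keys_empty names
  have htl : top_level_names_py names = G.keys := by
    rw [hkeys]; unfold top_level_names_py; rw [pv_firstSeg_fun]
  have hnodup : G.keys.Nodup := by rw [hkeys]; exact PySem.Set.nodup_ofList _
  have hgetD : ∀ k, PySem.Dict.getD G k [] = (names.filter (pvQ k)).map pvRestS := by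
    intro k
    rw [hG, pv_getD, PySem.Dict.getD_empty, List.nil_append]
  have hnos : ∀ k, k ∈ G.keys → '/' ∉ k.toList := by
    intro k hk
    rw [hkeys] at hk
    obtain ⟨n, -, rfl⟩ := List.mem_map.mp ((PySem.Set.mem_ofList _ _).mp hk)
    show '/' ∉ (String.ofList (pvSeg n.toList)).toList
    rw [String.toList_ofList]
    exact pv_seg_no_slash _
  rw [htl]
  have hb1 : (PySem.Set.inter G.keys pvRootEntries ≠ [])
      ↔ G.keys.any (fun k => PySem.Set.contains pvRootEntries k) = true :=
    pv_filter_ne_nil _ _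
  by_cases h1 : G.keys.any (fun k => PySem.Set.contains pvRootEntries k) = true
  · rw [if_pos (hb1.mpr h1), if_pos h1]
  · rw [if_neg (fun hc => h1 (hb1.mp hc)), if_neg h1]
    set LA := G.keys.filter
        (fun k => names.any (fun item => PySem.Str.startswith item (String.ofList (k.toList ++ ['/']))))
      with hLA
    have hofl : PySem.Set.ofList LA = LA :=
      PySem.Set.ofList_eq_self_of_nodup _ (hnodup.filter _)
    have hitems : G.items = G.keys.map (fun k => (k, PySem.Dict.getD G k [])) :=
      PySem.Dict.items_eq_map_keys G hnodup []
    have hpt : ∀ k ∈ G.keys,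
        (names.any (fun item => PySem.Str.startswith item (String.ofList (k.toList ++ ['/']))))
          = decide (PySem.Dict.getD G k [] ≠ []) := by
      intro k hk
      have hsw : (fun item => PySem.Str.startswith item (String.ofList (k.toList ++ ['/']))) = pvQ k :=
        funext (fun n => pv_sw k n (hnos k hk))
      rw [hsw]
      apply pv_bool_ext
      rw [decide_eq_true_eq, hgetD k, Ne, List.map_eq_nil_iff]
      exact (pv_filter_ne_nil (pvQ k) names).symm
    have hdirs : ((G.items.filter (fun p => decide (p.2 ≠ []))).map Prod.fst) = LA := by
      rw [hitems, List.filter_map, List.map_map]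
      have hfst : (Prod.fst ∘ fun k => (k, PySem.Dict.getD G k [])) = id := rfl
      rw [hfst, List.map_id, hLA]
      exact List.filter_congr (fun x hx => (hpt x hx).symm)
    rw [hofl, hdirs]
    have hlen : (PySem.Set.len LA ≠ 1) ↔ (LA.length ≠ 1) := by
      show ¬((LA.length : Int) = 1) ↔ ¬(LA.length = 1)
      exact not_congr Nat.cast_eq_one
    by_cases h2 : LA.length = 1
    · rw [if_neg (show ¬(PySem.Set.len LA ≠ 1) from fun hc => (hlen.mp hc) h2)]
      rw [if_neg (show ¬(LA.length ≠ 1) from fun hc => hc h2)]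
      obtain ⟨w, hw⟩ := List.length_eq_one_iff.mp h2
      have hkw : w ∈ G.keys := by
        have hwm : w ∈ LA := by rw [hw]; simp
        rw [hLA] at hwm
        exact (List.mem_filter.mp hwm).1
      have hwno : '/' ∉ w.toList := hnos w hkw
      rw [hw]
      simp only [List.headD_cons]
      set pfx := String.ofList (w.toList ++ ['/']) with hpfx
      have hswfun : ∀ n, PySem.Str.startswith n pfx = pvQ w n := by
        intro n; rw [hpfx]; exact pv_sw w n hwno
      have hlenpfx : PySem.Str.len pfx = ((w.toList.length + 1 : Nat) : Int) := by
        rw [PySem.Str.len_eq, hpfx, String.toList_ofList]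
        simp
      have hslice : ∀ n : String, PySem.Str.startswith n pfx = true →
          PySem.Str.slice n (some (PySem.Str.len pfx)) none = pvRestS n := by
        intro n hn
        have hpre : (w.toList ++ ['/']).isPrefixOf n.toList = true := by
          rw [PySem.Str.startswith_eq, hpfx] at hn
          simpa [PySem.Chars.startswith, String.toList_ofList] using hn
        apply String.toList_inj.mp
        rw [PySem.Str.toList_slice, PySem.Chars.slice_eq_listSlice, hlenpfx,
            PySem.List.slice_from _ (Int.natCast_nonneg _), Int.toNat_natCast]
        rw [show (pvRestS n).toList = pvRest n.toList from String.toList_ofList]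
        exact pv_strip hwno hpre
      have hstep : (fun (acc : List String) name =>
            if PySem.Str.startswith name pfx = true then
              if PySem.Str.slice name (some (PySem.Str.len pfx)) none ≠ "" then
                acc ++ [PySem.Str.slice name (some (PySem.Str.len pfx)) none]
              else acc
            else acc)
          = (fun acc name =>
              if (PySem.Str.startswith name pfx
                    && decide (PySem.Str.slice name (some (PySem.Str.len pfx)) none ≠ "")) = true then
                acc ++ [PySem.Str.slice name (some (PySem.Str.len pfx)) none]
              else acc) := by
        funext acc name
        cases hA : PySem.Str.startswith name pfx
        · simp only [Bool.false_and]
          rw [if_neg (by simp), if_neg (by simp)]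
        · simp only [Bool.true_and]
          rw [if_pos trivial]
          by_cases hB : PySem.Str.slice name (some (PySem.Str.len pfx)) none ≠ ""
          · rw [if_pos hB, if_pos (decide_eq_true hB)]
          · rw [if_neg hB, if_neg (by simpa using hB)]
      rw [hstep, PySem.List.foldl_append_if, List.nil_append]
      have hP : ∀ n ∈ names,
          (PySem.Str.startswith n pfx
            && decide (PySem.Str.slice n (some (PySem.Str.len pfx)) none ≠ ""))
          = (pvQ w n && decide (pvRestS n ≠ "")) := by
        intro n _
        rw [hswfun n]
        cases hq : pvQ w n with
        | false => simp
        | true =>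
          rw [hslice n (by rw [hswfun n, hq])]
      rw [List.filter_congr hP]
      have hmapstrip :
          (names.filter (fun n => pvQ w n && decide (pvRestS n ≠ ""))).map
              (fun n => PySem.Str.slice n (some (PySem.Str.len pfx)) none)
            = (names.filter (fun n => pvQ w n && decide (pvRestS n ≠ ""))).map pvRestS := by
        apply List.map_congr_left
        intro n hn
        have hq : pvQ w n = true := by
          have h := (List.mem_filter.mp hn).2
          simp only [Bool.and_eq_true] at h
          exact h.1
        exact hslice n (by rw [hswfun n, hq])
      rw [hmapstrip]
      set NL := (names.filter (fun n => pvQ w n && decide (pvRestS n ≠ ""))).map pvRestS with hNL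
      have hNLne : ∀ x ∈ NL, decide (x ≠ "") = true := by
        intro x hx
        rw [hNL] at hx
        obtain ⟨n, hn, rfl⟩ := List.mem_map.mp hx
        have h := (List.mem_filter.mp hn).2
        simp only [Bool.and_eq_true] at h
        exact h.2
      have htln : top_level_names_py NL = PySem.Set.ofList (NL.map pvSegS) := by
        unfold top_level_names_py
        rw [pv_firstSeg_fun, List.filter_eq_self.mpr hNLne]
      have hblist : (PySem.Dict.getD G w []).filter (fun rem => decide (rem ≠ "")) = NL := by
        rw [hgetD w, List.filter_map, hNL, List.filter_filter]
        exact congrArg _ (List.filter_congr (fun x _ => by simp [Function.comp, Bool.and_comm]))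
      rw [hblist, htln]
      have hc3 : (PySem.Set.inter (PySem.Set.ofList (NL.map pvSegS)) pvRootEntries ≠ [])
          ↔ (NL.any (fun rem =>
                PySem.Set.contains pvRootEntries (String.ofList (rem.toList.takeWhile (· ≠ '/')))) = true) := by
        rw [pv_inter_ne_nil, List.any_map]
        exact Iff.rfl
      by_cases h3 : NL.any (fun rem =>
          PySem.Set.contains pvRootEntries (String.ofList (rem.toList.takeWhile (· ≠ '/')))) = true
      · rw [if_pos (hc3.mpr h3), if_pos h3]
      · rw [if_neg (fun hc => h3 (hc3.mp hc)), if_neg h3]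
    · rw [if_pos (show PySem.Set.len LA ≠ 1 from hlen.mpr h2),
          if_pos (show LA.length ≠ 1 from h2)]

-- ===== VERDICT (by name: the statement is the Claim_ definition above) =====
theorem resolve_root_prefix_py_spec : Claim_equal_resolve_root_prefix_py := by
  intro names _
  exact pv_main names
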